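-- pv_equiv track=rewrite | github.com/wradlib/wradlib | wradlib/io.py | get_radolan_header_token_pos
-- ===== SOURCE A (Python) =====
-- def get_radolan_header_token():
--     """Return array with known header token of radolan composites
--
--     Returns
--     -------
--     head : dict
--         with known header token, value set to None
--     """
--     head = {'BY': None, 'VS': None, 'SW': None, 'PR': None,
--             'INT': None, 'GP': None, 'MS': None, 'LV': None,
--             'CS': None, 'MX': None, 'BG': None, 'ST': None,
--             'VV': None, 'MF': None}
--     return head
--
-- def get_radolan_header_token_pos(header):
--     """Get Token and positions from DWD radolan header
--
--     Parameters
--     ----------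
--     header : string
--         (ASCII header)
--
--     Returns
--     -------
--     head : dictionary
--         with found header tokens and positions
--     """
--
--     head_dict = get_radolan_header_token()
--
--     for token in head_dict.keys():
--         d = header.rfind(token)
--         if d > -1:
--             head_dict[token] = d
--     head = {}
--
--     result_dict = {}
--     result_dict.update((k, v) for k, v in head_dict.items() if v is not None)
--     for k, v in head_dict.items():
--         if v is not None:
--             start = v + len(k)
--             filt = [x for x in result_dict.values() if x > v]
--             if filt:
--                 stop = min(filt)
--             else:
--                 stop = len(header)
--             head[k] = (start, stop)
--         else:
--             head[k] = v
--
--     return head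
-- ===== SOURCE B (Python) =====
-- def get_radolan_header_token_pos(header):
--     tokens = ['BY', 'VS', 'SW', 'PR', 'INT', 'GP', 'MS', 'LV',
--               'CS', 'MX', 'BG', 'ST', 'VV', 'MF']
--     found = []
--     for t in tokens:
--         d = header.rfind(t)
--         if d > -1:
--             found.append((d, t))
--     found.sort(key=lambda x: x[0])
--     spans = {}
--     stop = len(header)
--     next_pos = None
--     for pos, tok in reversed(found):
--         if next_pos is not None and next_pos > pos:
--             stop = next_pos
--         spans[tok] = (pos + len(tok), stop)
--         next_pos = pos
--     return {t: spans.get(t) for t in tokens}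
-- ===== Notes on version B (the rewrite author's own statement) =====
-- stated objective: alternative
-- what changed: Replaces A's per-token min-over-filtered-positions rescan (and its intermediate result_dict) by collecting the found (position, token) pairs once, sorting them by position, and computing every span in a single backward pass that threads the next-greater position as an accumulator.
import Mathlib
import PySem

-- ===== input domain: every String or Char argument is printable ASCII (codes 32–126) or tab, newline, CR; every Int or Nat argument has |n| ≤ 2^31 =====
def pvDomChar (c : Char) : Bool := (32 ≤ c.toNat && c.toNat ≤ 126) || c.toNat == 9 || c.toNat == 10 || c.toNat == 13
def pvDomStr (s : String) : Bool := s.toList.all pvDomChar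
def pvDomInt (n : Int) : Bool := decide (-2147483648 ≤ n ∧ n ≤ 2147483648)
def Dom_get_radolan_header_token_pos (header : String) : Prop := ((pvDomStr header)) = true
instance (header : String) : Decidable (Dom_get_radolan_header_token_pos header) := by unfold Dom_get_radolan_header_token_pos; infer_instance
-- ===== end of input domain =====

-- B replaces A's per-token min-over-filtered-positions rescan by one sort of the found
-- (position, token) pairs plus a single backward pass threading the next position (objective: alternative).

-- ===== PORT A =====
def get_radolan_header_token_pos (header : String) : List (String × Option (Int × Int)) :=
  -- head_dict = get_radolan_header_token()
  let head_dict0 : PySem.Dict String (Option Int) :=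
    PySem.Dict.ofList [("BY", none), ("VS", none), ("SW", none), ("PR", none),
      ("INT", none), ("GP", none), ("MS", none), ("LV", none),
      ("CS", none), ("MX", none), ("BG", none), ("ST", none),
      ("VV", none), ("MF", none)]
  -- for token in head_dict.keys(): d = header.rfind(token); if d > -1: head_dict[token] = d
  let head_dict := (PySem.Dict.keys head_dict0).foldl (fun d token =>
      let dd := PySem.Str.rfind header token
      if dd > -1 then PySem.Dict.insert d token (some dd) else d) head_dict0
  -- result_dict.update((k, v) for k, v in head_dict.items() if v is not None)
  let result_dict : PySem.Dict String Int := (PySem.Dict.items head_dict).foldl (fun rd kv =>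
      match kv.2 with
      | some v => PySem.Dict.insert rd kv.1 v
      | none => rd) PySem.Dict.empty
  -- for k, v in head_dict.items(): …
  let head : PySem.Dict String (Option (Int × Int)) := (PySem.Dict.items head_dict).foldl (fun hd kv =>
      match kv.2 with
      | some v =>
          let start := v + PySem.Str.len kv.1
          let filt := (PySem.Dict.values result_dict).filter (fun x => decide (x > v))
          -- 'if filt: stop = min(filt) else: stop = len(header)'; min? is none exactly on []
          let stop := match PySem.List.min? filt (fun x => x) with
            | some m => m
            | none => PySem.Str.len header
          PySem.Dict.insert hd kv.1 (some (start, stop))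
      | none => PySem.Dict.insert hd kv.1 none) PySem.Dict.empty
  PySem.Dict.items head

-- ===== PORT B =====
def pvTokensB : List String :=
  ["BY", "VS", "SW", "PR", "INT", "GP", "MS", "LV", "CS", "MX", "BG", "ST", "VV", "MF"]

def get_radolan_header_token_pos_alt (header : String) : List (String × Option (Int × Int)) :=
  -- found = [(header.rfind(t), t) for t in tokens if rfind > -1]; found.sort(key=fst)
  let found : List (Int × String) := pvTokensB.foldl (fun acc t =>
      let d := PySem.Str.rfind header t
      if d > -1 then acc ++ [(d, t)] else acc) []
  let sortedF := PySem.List.sorted found (fun x => x.1) false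
  -- backward pass: state = (spans, stop, next_pos)
  let st := (sortedF.reverse).foldl (fun st pt =>
      let stop := match st.2.2 with
        | some np => if np > pt.1 then np else st.2.1
        | none => st.2.1
      (PySem.Dict.insert st.1 pt.2 (pt.1 + PySem.Str.len pt.2, stop), stop, some pt.1))
      ((PySem.Dict.empty : PySem.Dict String (Int × Int)), PySem.Str.len header, (none : Option Int))
  -- {t: spans.get(t) for t in tokens}
  pvTokensB.map (fun t => (t, PySem.Dict.get? st.1 t))

-- ===== PRECONDITION & SPEC =====
def Spec_get_radolan_header_token_pos (header : String) (out : List (String × Option (Int × Int))) : Prop := out = get_radolan_header_token_pos_alt header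
instance (header : String) (out : List (String × Option (Int × Int))) : Decidable (Spec_get_radolan_header_token_pos header out) := by unfold Spec_get_radolan_header_token_pos; infer_instance

-- ===== CLAIM (what is proved, stated in full; the proofs are below) =====
def Claim_equal_get_radolan_header_token_pos : Prop := ∀ (header : String), Dom_get_radolan_header_token_pos header → Spec_get_radolan_header_token_pos header (get_radolan_header_token_pos header)

-- ===== LEMMAS AND PROOFS =====

/-- rfind of one token. -/
def pvR (header t : String) : Int := PySem.Str.rfind header t

/-- the Option stored for one token after A's first loop. -/
def pvOptR (header t : String) : Option Int :=
  if pvR header t > -1 then some (pvR header t) else none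

/-- the found (position, token) pairs in canonical token order. -/
def pvFoundL (header : String) : List (Int × String) :=
  (pvTokensB.filter (fun t => decide (pvR header t > -1))).map (fun t => (pvR header t, t))

/-- min of the positions strictly greater than v, default n. -/
def pvMinGT (v n : Int) (P : List Int) : Int :=
  match PySem.List.min? (P.filter (fun x => decide (x > v))) (fun x => x) with
  | some m => m
  | none => n

/-- the per-token value A's final loop stores. -/
def pvV (header : String) (P : List Int) (kv : String × Option Int) : Option (Int × Int) :=
  match kv.2 with
  | some v => some (v + PySem.Str.len kv.1, pvMinGT v (PySem.Str.len header) P)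
  | none => none

/-- B's walk step. -/
def pvStep (st : PySem.Dict String (Int × Int) × Int × Option Int) (pt : Int × String) :
    PySem.Dict String (Int × Int) × Int × Option Int :=
  let stop := match st.2.2 with
    | some np => if np > pt.1 then np else st.2.1
    | none => st.2.1
  (PySem.Dict.insert st.1 pt.2 (pt.1 + PySem.Str.len pt.2, stop), stop, some pt.1)

/-- B's walk over the ascending list, as a foldr. -/
def pvWalk (n : Int) (S : List (Int × String)) :
    PySem.Dict String (Int × Int) × Int × Option Int :=
  S.foldr (fun x y => pvStep y x) ((PySem.Dict.empty : PySem.Dict String (Int × Int)), n, none)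

lemma pv_min?_id_eq_of_perm (xs ys : List Int) (h : xs.Perm ys) :
    PySem.List.min? xs (fun x => x) = PySem.List.min? ys (fun x => x) := by
  cases h1 : PySem.List.min? xs (fun x => x) with
  | none =>
      rw [PySem.List.min?_eq_none_iff] at h1
      subst h1
      rw [eq_comm, PySem.List.min?_eq_none_iff]
      exact h.nil_eq.symm
  | some a =>
      cases h2 : PySem.List.min? ys (fun x => x) with
      | none =>
          rw [PySem.List.min?_eq_none_iff] at h2
          subst h2
          have := h.mem_iff.mp (PySem.List.min?_mem h1)
          simp at this
      | some b =>
          have hab : a ≤ b := PySem.List.min?_isMin h1 b (h.mem_iff.mpr (PySem.List.min?_mem h2))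
          have hba : b ≤ a := PySem.List.min?_isMin h2 a (h.mem_iff.mp (PySem.List.min?_mem h1))
          exact congrArg some (le_antisymm hab hba)

lemma pv_minGT_perm (v n : Int) (P P' : List Int) (h : P.Perm P') :
    pvMinGT v n P = pvMinGT v n P' := by
  unfold pvMinGT
  rw [pv_min?_id_eq_of_perm _ _ (h.filter _)]

lemma pv_minGT_not_mem_gt (v n p : Int) (P : List Int) (hp : ¬ p > v) :
    pvMinGT v n (p :: P) = pvMinGT v n P := by
  unfold pvMinGT
  rw [List.filter_cons_of_neg (by simpa using hp)]

lemma pv_minGT_head (v n y : Int) (rest : List Int) (hy : y > v) (hmin : ∀ q ∈ rest, y ≤ q) :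
    pvMinGT v n (y :: rest) = y := by
  unfold pvMinGT
  rw [List.filter_cons_of_pos (by simpa using hy), PySem.List.min?_id_cons]
  have hle := (PySem.List.foldl_min_le (rest.filter (fun x => decide (x > v))) y).1
  rcases PySem.List.foldl_min_mem (rest.filter (fun x => decide (x > v))) y with hm | hm
  · simp [hm]
  · have : y ≤ List.foldl min y (rest.filter (fun x => decide (x > v))) :=
      hmin _ (List.mem_of_mem_filter hm)
    simp [le_antisymm hle this]

lemma pv_minGT_nil (v n : Int) : pvMinGT v n [] = n := by
  unfold pvMinGT
  rw [List.filter_nil, (PySem.List.min?_eq_none_iff _ _).mpr rfl]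

/-- the step of A's first loop, named so the proofs can rewrite it. -/
def pvUpd (header : String) (d : PySem.Dict String (Option Int)) (token : String) :
    PySem.Dict String (Option Int) :=
  let dd := PySem.Str.rfind header token
  if dd > -1 then PySem.Dict.insert d token (some dd) else d

/-- A's first loop: overwriting each key in turn of a dict that lists those keys. -/
lemma pv_upd_items (header : String) :
    ∀ (ks : List String) (pre : List (String × Option Int)),
    (pre.map Prod.fst ++ ks).Nodup →
    (ks.foldl (pvUpd header)
      (PySem.Dict.mk (pre ++ ks.map (fun k => (k, (none : Option Int)))))).items
    = pre ++ ks.map (fun k => (k, pvOptR header k)) := by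
  intro ks
  induction ks with
  | nil => intro pre _; simp
  | cons k tl ih =>
      intro pre hnd
      obtain ⟨hnd1, hnd2, hdisj⟩ := List.nodup_append.mp hnd
      have hkpre : k ∉ pre.map Prod.fst := fun hk => hdisj k hk k List.mem_cons_self rfl
      have hktl : k ∉ tl := (List.nodup_cons.mp hnd2).1
      have hmap : ∀ (w : Option Int),
          (pre ++ (k, (none : Option Int)) :: tl.map (fun k => (k, (none : Option Int)))).map
            (fun p => if (p.1 == k) = true then (k, w) else p)
          = pre ++ (k, w) :: tl.map (fun k => (k, (none : Option Int))) := by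
        intro w
        rw [List.map_append, List.map_cons]
        congr 1
        · refine (List.map_congr_left ?_).trans (List.map_id _)
          intro p hp
          have : p.1 ≠ k := fun hEq => hkpre (hEq ▸ List.mem_map.mpr ⟨p, hp, rfl⟩)
          simp [this]
        · congr 1
          · simp
          · refine (List.map_congr_left ?_).trans (List.map_id _)
            intro p hp
            obtain ⟨a, ha, rfl⟩ := List.mem_map.mp hp
            have : a ≠ k := fun hEq => hktl (hEq ▸ ha)
            simp [this]
      have hcont : (PySem.Dict.mk (pre ++ (k, (none : Option Int)) ::
          tl.map (fun k => (k, (none : Option Int))))).contains k = true := by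
        rw [PySem.Dict.contains_eq_decide_mem_keys]
        simp [PySem.Dict.keys]
      have hnd' : ∀ (w : Option Int), ((pre ++ [(k, w)]).map Prod.fst ++ tl).Nodup := by
        intro w
        simpa [List.append_assoc] using hnd
      rw [List.map_cons, List.foldl_cons]
      by_cases hr : PySem.Str.rfind header k > -1
      · have hstep : pvUpd header (PySem.Dict.mk (pre ++ (k, (none : Option Int)) ::
            tl.map (fun k => (k, (none : Option Int))))) k
            = PySem.Dict.mk ((pre ++ [(k, some (PySem.Str.rfind header k))]) ++
                tl.map (fun k => (k, (none : Option Int)))) := by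
          unfold pvUpd
          rw [if_pos hr]
          apply PySem.Dict.ext
          rw [PySem.Dict.items_insert_of_contains _ _ hcont]
          show (pre ++ (k, (none : Option Int)) :: tl.map (fun k => (k, (none : Option Int)))).map
            (fun p => if (p.1 == k) = true then (k, some (PySem.Str.rfind header k)) else p) = _
          rw [hmap]
          simp [List.append_assoc]
        rw [hstep, ih (pre ++ [(k, some (PySem.Str.rfind header k))]) (hnd' _)]
        have hopt : pvOptR header k = some (PySem.Str.rfind header k) := by
          unfold pvOptR pvR; rw [if_pos hr]
        simp [hopt, List.append_assoc]
      · have hstep : pvUpd header (PySem.Dict.mk (pre ++ (k, (none : Option Int)) ::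
            tl.map (fun k => (k, (none : Option Int))))) k
            = PySem.Dict.mk ((pre ++ [(k, (none : Option Int))]) ++
                tl.map (fun k => (k, (none : Option Int)))) := by
          unfold pvUpd
          rw [if_neg hr]
          apply PySem.Dict.ext
          show pre ++ (k, (none : Option Int)) :: tl.map (fun k => (k, (none : Option Int))) = _
          simp [List.append_assoc]
        rw [hstep, ih (pre ++ [(k, (none : Option Int))]) (hnd' _)]
        have hopt : pvOptR header k = none := by
          unfold pvOptR pvR; rw [if_neg hr]
        simp [hopt, List.append_assoc]

/-- the step of A's result_dict loop. -/
def pvRes (rd : PySem.Dict String Int) (kv : String × Option Int) : PySem.Dict String Int :=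
  match kv.2 with
  | some v => PySem.Dict.insert rd kv.1 v
  | none => rd

/-- A's result_dict loop: fresh-key inserts of the non-none entries append. -/
lemma pv_res_items :
    ∀ (L : List (String × Option Int)) (rd : PySem.Dict String Int),
    (rd.keys ++ L.map Prod.fst).Nodup →
    (L.foldl pvRes rd).items
    = rd.items ++ L.filterMap (fun kv => kv.2.map (fun v => (kv.1, v))) := by
  intro L
  induction L with
  | nil => intro rd _; simp
  | cons kv tl ih =>
      intro rd hnd
      rw [List.map_cons] at hnd
      rw [List.foldl_cons]
      cases h : kv.2 with
      | none =>
          have hstep : pvRes rd kv = rd := by unfold pvRes; rw [h]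
          have hnd' : (rd.keys ++ tl.map Prod.fst).Nodup :=
            ((List.Sublist.append_left (List.sublist_cons_self _ _) _).nodup hnd)
          rw [hstep, ih rd hnd', List.filterMap_cons]
          simp [h]
      | some v =>
          obtain ⟨hk1, hk2, hdisj⟩ := List.nodup_append.mp hnd
          have hcont : rd.contains kv.1 = false := by
            rw [PySem.Dict.contains_eq_decide_mem_keys]
            simp only [decide_eq_false_iff_not]
            intro hk
            exact hdisj kv.1 hk kv.1 List.mem_cons_self rfl
          have hstep : pvRes rd kv = rd.insert kv.1 v := by unfold pvRes; rw [h]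
          have hitems : (rd.insert kv.1 v).items = rd.items ++ [(kv.1, v)] :=
            PySem.Dict.items_insert_of_not_contains _ _ hcont
          have hkeys : (rd.insert kv.1 v).keys = rd.keys ++ [kv.1] := by
            simp only [PySem.Dict.keys, hitems, List.map_append, List.map_cons, List.map_nil]
          have hnd' : ((rd.insert kv.1 v).keys ++ tl.map Prod.fst).Nodup := by
            rw [hkeys, List.append_assoc]
            simpa [List.append_assoc] using hnd
          rw [hstep, ih _ hnd', hitems, List.filterMap_cons]
          simp [h, List.append_assoc]

/-- the three invariants of B's backward walk over an ascending list. -/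
lemma pv_walk_spec (n : Int) :
    ∀ (S : List (Int × String)), S.Pairwise (fun a b => a.1 ≤ b.1) →
    (pvWalk n S).2.2 = S.head?.map Prod.fst ∧
    (match S with
     | [] => (pvWalk n S).2.1 = n
     | x :: _ => (pvWalk n S).2.1 = pvMinGT x.1 n (S.map Prod.fst)) ∧
    ((S.map Prod.snd).Nodup →
      (∀ v t, (v, t) ∈ S →
        (pvWalk n S).1.get? t = some (v + PySem.Str.len t, pvMinGT v n (S.map Prod.fst))) ∧
      (∀ t, t ∉ S.map Prod.snd → (pvWalk n S).1.get? t = none)) := by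
  intro S
  induction S with
  | nil =>
      intro _
      refine ⟨rfl, rfl, fun _ => ⟨?_, ?_⟩⟩
      · intro v t h; simp at h
      · intro t _; exact PySem.Dict.get?_empty t
  | cons x tl ih =>
      intro hasc
      obtain ⟨hx, htl⟩ := List.pairwise_cons.mp hasc
      obtain ⟨ih1, ih2, ih3⟩ := ih htl
      have hstop : (pvWalk n (x :: tl)).2.1 = pvMinGT x.1 n ((x :: tl).map Prod.fst) := by
        cases tl with
        | nil =>
            show (match (none : Option Int) with
                  | some np => if np > x.1 then np else n
                  | none => n) = _
            rw [List.map_cons, List.map_nil, pv_minGT_not_mem_gt _ _ _ _ (lt_irrefl x.1),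
              pv_minGT_nil]
        | cons y rest =>
            have h1 : (pvWalk n (y :: rest)).2.2 = some y.1 := by rw [ih1]; rfl
            show (match (pvWalk n (y :: rest)).2.2 with
                  | some np => if np > x.1 then np else (pvWalk n (y :: rest)).2.1
                  | none => (pvWalk n (y :: rest)).2.1) = _
            rw [h1]
            by_cases hgt : y.1 > x.1
            · simp only [if_pos hgt]
              rw [List.map_cons, pv_minGT_not_mem_gt _ _ _ _ (lt_irrefl x.1), List.map_cons]
              refine (pv_minGT_head _ _ _ _ hgt ?_).symm
              intro q hq
              obtain ⟨p, hp, rfl⟩ := List.mem_map.mp hq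
              exact (List.pairwise_cons.mp htl).1 p hp
            · simp only [if_neg hgt]
              have heq : y.1 = x.1 := le_antisymm (not_lt.mp hgt) (hx y List.mem_cons_self)
              have h2 : (pvWalk n (y :: rest)).2.1 = pvMinGT y.1 n ((y :: rest).map Prod.fst) := ih2
              rw [h2, List.map_cons (f := Prod.fst) (a := x),
                pv_minGT_not_mem_gt _ _ _ _ (lt_irrefl x.1), heq]
      refine ⟨rfl, hstop, ?_⟩
      intro hnd
      rw [List.map_cons] at hnd
      obtain ⟨hx2, hndtl⟩ := List.nodup_cons.mp hnd
      obtain ⟨ihmem, ihnone⟩ := ih3 hndtl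
      have hins : (pvWalk n (x :: tl)).1
          = (pvWalk n tl).1.insert x.2 (x.1 + PySem.Str.len x.2, (pvWalk n (x :: tl)).2.1) := rfl
      constructor
      · intro v t hvt
        rcases List.mem_cons.mp hvt with h | h
        · subst h
          rw [hins, PySem.Dict.get?_insert_self, hstop]
        · have ht : t ∈ tl.map Prod.snd := List.mem_map.mpr ⟨(v, t), h, rfl⟩
          have hne : t ≠ x.2 := fun hEq => hx2 (hEq ▸ ht)
          rw [hins, PySem.Dict.get?_insert_of_ne _ _ hne, ihmem v t h, List.map_cons,
            pv_minGT_not_mem_gt _ _ _ _ (not_lt.mpr (hx (v, t) h))]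
      · intro t hts
        rw [List.map_cons, List.mem_cons] at hts
        push Not at hts
        rw [hins, PySem.Dict.get?_insert_of_ne _ _ hts.1, ihnone t hts.2]

/-- the step of A's final loop, with the positions list P abstracted out. -/
def pvHeadStep (header : String) (P : List Int) (hd : PySem.Dict String (Option (Int × Int)))
    (kv : String × Option Int) : PySem.Dict String (Option (Int × Int)) :=
  match kv.2 with
  | some v => PySem.Dict.insert hd kv.1
      (some (v + PySem.Str.len kv.1, pvMinGT v (PySem.Str.len header) P))
  | none => PySem.Dict.insert hd kv.1 none

lemma pvHeadStep_eq (header : String) (P : List Int) (hd : PySem.Dict String (Option (Int × Int)))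
    (kv : String × Option Int) :
    pvHeadStep header P hd kv = PySem.Dict.insert hd kv.1 (pvV header P kv) := by
  cases h : kv.2 <;> simp [pvHeadStep, pvV, h]

lemma pv_filterMap_opt (header : String) (l : List String) :
    l.filterMap (fun kv => (pvOptR header kv).map (fun v => (kv, v)))
    = (l.filter (fun t => decide (pvR header t > -1))).map (fun t => (t, pvR header t)) := by
  induction l with
  | nil => rfl
  | cons a tl ih =>
      rw [List.filterMap_cons, List.filter_cons]
      by_cases h : pvR header a > -1
      · have : pvOptR header a = some (pvR header a) := by unfold pvOptR; rw [if_pos h]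
        simp [this, h, ih]
      · have : pvOptR header a = none := by unfold pvOptR; rw [if_neg h]
        simp [this, h, ih]

/-- the canonical token list is duplicate-free. -/
lemma pv_tokens_nodup : pvTokensB.Nodup := by decide

/-- A's output, in closed form. -/
lemma pv_A_closed (header : String) :
    get_radolan_header_token_pos header
    = pvTokensB.map (fun t => (t, pvV header ((pvFoundL header).map Prod.fst) (t, pvOptR header t))) := by
  show PySem.Dict.items
      (((pvTokensB.foldl (pvUpd header)
          (PySem.Dict.mk (pvTokensB.map (fun k => (k, (none : Option Int)))))).items).foldl
        (pvHeadStep header (PySem.Dict.values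
          (((pvTokensB.foldl (pvUpd header)
            (PySem.Dict.mk (pvTokensB.map (fun k => (k, (none : Option Int)))))).items).foldl
            pvRes PySem.Dict.empty)))
        PySem.Dict.empty)
    = _
  have h1 := pv_upd_items header pvTokensB [] (by decide)
  simp only [List.nil_append] at h1
  rw [h1]
  have hndres : ((PySem.Dict.empty : PySem.Dict String Int).keys ++
      ((pvTokensB.map (fun k => (k, pvOptR header k))).map Prod.fst)).Nodup := by
    have hfst : ((pvTokensB.map (fun k => (k, pvOptR header k))).map Prod.fst) = pvTokensB := by
      rw [List.map_map]; exact (List.map_congr_left (fun a _ => rfl)).trans (List.map_id _)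
    rw [hfst, PySem.Dict.keys_empty, List.nil_append]
    exact pv_tokens_nodup
  have h2 := pv_res_items (pvTokensB.map (fun k => (k, pvOptR header k))) PySem.Dict.empty hndres
  have hP : (((pvTokensB.map (fun k => (k, pvOptR header k))).foldl pvRes
      (PySem.Dict.empty : PySem.Dict String Int))).values = (pvFoundL header).map Prod.fst := by
    unfold PySem.Dict.values
    rw [h2]
    rw [List.filterMap_map]
    show (pvTokensB.filterMap (fun kv => (pvOptR header kv).map (fun v => (kv, v)))).map Prod.snd = _
    rw [pv_filterMap_opt]
    unfold pvFoundL
    rw [List.map_map, List.map_map]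
    rfl
  rw [hP]
  rw [PySem.List.foldl_congr_mem _ (pvHeadStep header ((pvFoundL header).map Prod.fst))
    (fun hd kv => PySem.Dict.insert hd kv.1 (pvV header ((pvFoundL header).map Prod.fst) kv)) _
    (fun acc kv _ => pvHeadStep_eq header _ acc kv)]
  rw [PySem.Dict.items_foldl_insert_fresh _ Prod.fst (pvV header ((pvFoundL header).map Prod.fst)) _
    (fun a _ => PySem.Dict.contains_empty a.1)
    (by
      have hfst : ((pvTokensB.map (fun k => (k, pvOptR header k))).map Prod.fst) = pvTokensB := by
        rw [List.map_map]; exact (List.map_congr_left (fun a _ => rfl)).trans (List.map_id _)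
      rw [hfst]; exact pv_tokens_nodup)]
  rw [List.map_map]
  rfl

/-- B's output, in closed form. -/
lemma pv_B_closed (header : String) :
    get_radolan_header_token_pos_alt header
    = pvTokensB.map (fun t =>
        (t, (pvWalk (PySem.Str.len header)
              (PySem.List.sorted (pvFoundL header) (fun x => x.1) false)).1.get? t)) := by
  show pvTokensB.map (fun t => (t, PySem.Dict.get?
      (((PySem.List.sorted
          (pvTokensB.foldl
            (fun acc t => if pvR header t > -1 then acc ++ [(pvR header t, t)] else acc)
            ([] : List (Int × String)))
          (fun x => x.1) false).reverse).foldl (fun st pt => pvStep st pt)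
        ((PySem.Dict.empty : PySem.Dict String (Int × Int)), PySem.Str.len header,
          (none : Option Int))).1 t)) = _
  have hfound : (pvTokensB.foldl
      (fun acc t => if pvR header t > -1 then acc ++ [(pvR header t, t)] else acc)
      ([] : List (Int × String))) = pvFoundL header := by
    rw [PySem.List.foldl_append_ite (fun t => pvR header t > -1) (fun t => (pvR header t, t))]
    rw [List.nil_append]
    rfl
  rw [hfound, List.foldl_reverse]
  rfl

-- ===== VERDICT (by name: the statement is the Claim_ definition above) =====
theorem get_radolan_header_token_pos_spec : Claim_equal_get_radolan_header_token_pos := by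
  intro header _
  unfold Spec_get_radolan_header_token_pos
  rw [pv_A_closed, pv_B_closed]
  refine List.map_congr_left ?_
  intro t ht
  have hperm := PySem.List.sorted_perm (pvFoundL header) (fun x => x.1) false
  have hasc := PySem.List.sorted_pairwise (pvFoundL header) (fun x => x.1)
  have hsnd : (pvFoundL header).map Prod.snd
      = pvTokensB.filter (fun t => decide (pvR header t > -1)) := by
    unfold pvFoundL
    rw [List.map_map]
    exact (List.map_congr_left (fun a _ => rfl)).trans (List.map_id _)
  have hndS : (((PySem.List.sorted (pvFoundL header) (fun x => x.1) false).map Prod.snd)).Nodup := by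
    rw [(hperm.map Prod.snd).nodup_iff, hsnd]
    exact pv_tokens_nodup.filter _
  obtain ⟨-, -, h3⟩ := pv_walk_spec (PySem.Str.len header)
    (PySem.List.sorted (pvFoundL header) (fun x => x.1) false) hasc
  obtain ⟨hmemS, hnoneS⟩ := h3 hndS
  by_cases hr : pvR header t > -1
  · have hin : (pvR header t, t) ∈ pvFoundL header :=
      List.mem_map.mpr ⟨t, List.mem_filter.mpr ⟨ht, by simpa using hr⟩, rfl⟩
    rw [hmemS (pvR header t) t (hperm.mem_iff.mpr hin)]
    have hopt : pvOptR header t = some (pvR header t) := by unfold pvOptR; rw [if_pos hr]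
    simp only [pvV, hopt]
    rw [pv_minGT_perm _ _ _ _ (hperm.map Prod.fst)]
  · have hnotin : t ∉ (PySem.List.sorted (pvFoundL header) (fun x => x.1) false).map Prod.snd := by
      rw [(hperm.map Prod.snd).mem_iff, hsnd]
      intro hmem
      exact hr (by simpa using (List.mem_filter.mp hmem).2)
    rw [hnoneS t hnotin]
    have hopt : pvOptR header t = none := by unfold pvOptR; rw [if_neg hr]
    simp [pvV, hopt]
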